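-- pv_equiv track=rewrite | github.com/bahatyrveronika/Miniproject_2_Team_12 | Week_2/Graph_Week7/initial_solution.py | to_edge_dict
-- ===== SOURCE A (Python) =====
-- def to_edge_dict(edge_list: list[list[int]])-> dict[int, int]:
--     '''
--     Convert a graph from list of edges to dictionary of vertices.
--
--     >>> to_edge_dict([[1, 2], [3, 4], [1, 5], [2, 4]])
--     {1: [2, 5], 2: [1, 4], 3: [4], 4: [2, 3], 5: [1]}
--     '''
--     result = {}
--     for pair in edge_list:
--         for obj in enumerate(pair):
--             ind, digit = obj
--             if not digit in result:
--                 result[digit] = []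
--             if pair[ind-1] not in result[digit]:
--                 result[digit].append(pair[ind-1])
--                 result[digit].sort()
--     return result
-- ===== SOURCE B (Python) =====
-- def to_edge_dict(edge_list: list[list[int]]) -> dict[int, int]:
--     # Flatten to a stream of (vertex, predecessor) arcs, sort the deduplicated
--     # arcs once globally, group consecutively, then emit keys in first-seen order.
--     arcs = [(d, pair[i - 1]) for pair in edge_list for i, d in enumerate(pair)]
--     order = list(dict.fromkeys(d for d, _ in arcs))
--     grouped = {}
--     for d, p in sorted(set(arcs)):
--         grouped.setdefault(d, []).append(p)
--     return {d: grouped[d] for d in order}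
-- ===== Notes on version B (the rewrite author's own statement) =====
-- stated objective: alternative
-- what changed: B flattens the edges into one (vertex, predecessor) arc stream, deduplicates it as a set, sorts it once globally, groups consecutive arcs per vertex, and emits keys in first-seen order - staged sort-and-group instead of A's incremental dict of lists with a membership scan and a re-sort on every insertion (asymptotically better on dense vertices, but not measurably faster on random inputs).
import Mathlib
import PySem

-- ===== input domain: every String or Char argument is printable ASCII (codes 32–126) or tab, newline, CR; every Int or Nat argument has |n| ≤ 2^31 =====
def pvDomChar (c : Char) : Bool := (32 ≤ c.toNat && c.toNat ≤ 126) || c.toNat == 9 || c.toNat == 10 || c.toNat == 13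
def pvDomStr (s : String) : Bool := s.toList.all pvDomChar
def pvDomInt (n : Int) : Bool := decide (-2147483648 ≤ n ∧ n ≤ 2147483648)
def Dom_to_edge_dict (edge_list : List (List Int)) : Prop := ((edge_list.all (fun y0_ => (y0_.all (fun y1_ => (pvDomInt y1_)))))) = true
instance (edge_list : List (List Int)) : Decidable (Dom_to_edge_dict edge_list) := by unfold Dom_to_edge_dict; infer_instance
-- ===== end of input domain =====

-- B flattens the edges into one (vertex, predecessor) arc stream, deduplicates it, sorts it
-- once globally, groups consecutive arcs per vertex, and emits keys in first-seen order —
-- instead of A's incremental dict with a membership scan and a re-sort on every insertion.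

-- ===== PORT A =====
-- pair[ind-1]: ind ranges over 0..len(pair)-1, so ind-1 ∈ [-1, len-2] is always a valid
-- Python index (negative = from the end); the pyGetD default 0 is never used. Exact.
def to_edge_dict (edge_list : List (List Int)) : List (Int × List Int) :=
  (edge_list.foldl (fun result pair =>
    (PySem.List.enumerate pair).foldl (fun result obj =>
      let ind := obj.1
      let digit := obj.2
      let result := if result.contains digit then result else result.insert digit []
      let cur := result.getD digit []
      let prev := PySem.List.pyGetD pair (ind - 1) 0
      if prev ∈ cur then result
      else result.insert digit (PySem.List.sorted (cur ++ [prev]) (fun x => x))) result)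
    PySem.Dict.empty).items

-- ===== PORT B =====
-- arcs comprehension = flatMap/map; dict.fromkeys = PySem.List.dedup; sorted(set(arcs)) on
-- int pairs = sorted2 with tuple key (fst, snd); grouped.setdefault(d, []).append(p) has the
-- effect grouped[d] = grouped.get(d, []) + [p], i.e. Dict.modify; the final comprehension's
-- grouped[d] never raises (every d in order heads some arc), so getD's default is never used.
def to_edge_dict_alt (edge_list : List (List Int)) : List (Int × List Int) :=
  let arcs := edge_list.flatMap (fun pair =>
    (PySem.List.enumerate pair).map (fun o => (o.2, PySem.List.pyGetD pair (o.1 - 1) 0)))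
  let order := PySem.List.dedup (arcs.map Prod.fst)
  let grouped := (PySem.List.sorted2 (PySem.Set.ofList arcs) Prod.fst Prod.snd).foldl
    (fun g a => g.modify a.1 [] (fun l => l ++ [a.2])) PySem.Dict.empty
  order.map (fun d => (d, grouped.getD d []))

-- ===== PRECONDITION & SPEC =====
def Spec_to_edge_dict (edge_list : List (List Int)) (out : List (Int × List Int)) : Prop := out = to_edge_dict_alt edge_list
instance (edge_list : List (List Int)) (out : List (Int × List Int)) : Decidable (Spec_to_edge_dict edge_list out) := by unfold Spec_to_edge_dict; infer_instance

-- ===== CLAIM (what is proved, stated in full; the proofs are below) =====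
def Claim_equal_to_edge_dict : Prop := ∀ (edge_list : List (List Int)), Dom_to_edge_dict edge_list → Spec_to_edge_dict edge_list (to_edge_dict edge_list)

-- ===== LEMMAS AND PROOFS =====

-- The arc stream both programs traverse, and the two per-arc loop bodies.
def pvArcs (edge_list : List (List Int)) : List (Int × Int) :=
  edge_list.flatMap (fun pair =>
    (PySem.List.enumerate pair).map (fun o => (o.2, PySem.List.pyGetD pair (o.1 - 1) 0)))

def pvStepA (r : PySem.Dict Int (List Int)) (a : Int × Int) : PySem.Dict Int (List Int) :=
  let r1 := if r.contains a.1 then r else r.insert a.1 []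
  let cur := r1.getD a.1 []
  if a.2 ∈ cur then r1
  else r1.insert a.1 (PySem.List.sorted (cur ++ [a.2]) (fun x => x))

def pvStepB (b : PySem.Dict Int (List Int)) (a : Int × Int) : PySem.Dict Int (List Int) :=
  b.insert a.1 (PySem.Set.add (b.getD a.1 PySem.Set.empty) a.2)

-- A's nested loops are the single fold of pvStepA over the arc stream.
lemma A_eq_fold_arcs (edge_list : List (List Int)) :
    to_edge_dict edge_list = ((pvArcs edge_list).foldl pvStepA PySem.Dict.empty).items := by
  unfold to_edge_dict pvArcs
  rw [List.foldl_flatMap]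
  congr 1
  apply PySem.List.foldl_congr_mem
  intro acc pair _
  rw [List.foldl_map]
  rfl

-- Pointwise relation between an entry of A's dict (a sorted duplicate-free adjacency list)
-- and the corresponding entry of a dict of neighbour sets.
def QRel (p q : Int × List Int) : Prop :=
  p.1 = q.1 ∧ p.2.Pairwise (· < ·) ∧ q.2.Nodup ∧ ∀ x : Int, x ∈ p.2 ↔ x ∈ q.2

-- Invariant tying the two dicts together after any prefix of the arc stream.
def DRel (a b : PySem.Dict Int (List Int)) : Prop :=
  (a.items.map Prod.fst).Nodup ∧ List.Forall₂ QRel a.items b.items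

lemma forall2_map_fst {l m : List (Int × List Int)} (h : List.Forall₂ QRel l m) :
    l.map Prod.fst = m.map Prod.fst := by
  induction h with
  | nil => rfl
  | cons hq _ ih => simp [ih, hq.1]

lemma any_key {l m : List (Int × List Int)} (h : List.Forall₂ QRel l m) (k : Int) :
    l.any (fun p => p.1 == k) = m.any (fun p => p.1 == k) := by
  induction h with
  | nil => rfl
  | cons hq _ ih => simp [ih, hq.1]

lemma find?_key {l m : List (Int × List Int)} (h : List.Forall₂ QRel l m) (k : Int) :
    (l.find? (fun p => p.1 == k) = none ∧ m.find? (fun p => p.1 == k) = none) ∨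
    ∃ v w, l.find? (fun p => p.1 == k) = some (k, v) ∧
           m.find? (fun p => p.1 == k) = some (k, w) ∧ QRel (k, v) (k, w) := by
  induction h with
  | nil => exact Or.inl ⟨rfl, rfl⟩
  | @cons p q l' m' hq _ ih =>
    by_cases hk : p.1 = k
    · refine Or.inr ⟨p.2, q.2, ?_, ?_, ?_⟩
      · rw [List.find?_cons_of_pos (by simp [hk])]; simp [← hk]
      · rw [List.find?_cons_of_pos (by simp [← hq.1, hk])]
        rw [← hk]
        exact congrArg some (Prod.ext hq.1.symm rfl)
      · exact ⟨rfl, hq.2.1, hq.2.2.1, hq.2.2.2⟩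
    · rw [List.find?_cons_of_neg (by simp [hk]),
        List.find?_cons_of_neg (by simp [← hq.1, hk])]
      exact ih

lemma map_repl_of_not_mem {l : List (Int × List Int)} {k : Int} (w : List Int)
    (hk : k ∉ l.map Prod.fst) :
    l.map (fun p => if p.1 == k then (k, w) else p) = l := by
  induction l with
  | nil => rfl
  | cons p t ih =>
    simp only [List.map_cons, List.mem_cons, not_or] at hk ⊢
    rw [if_neg (by simp [Ne.symm hk.1]), ih hk.2]

lemma map_repl_id {l : List (Int × List Int)} {k : Int} {w : List Int}
    (hk : (l.map Prod.fst).Nodup) (hf : l.find? (fun p => p.1 == k) = some (k, w)) :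
    l.map (fun p => if p.1 == k then (k, w) else p) = l := by
  induction l with
  | nil => simp at hf
  | cons p t ih =>
    simp only [List.map_cons, List.nodup_cons] at hk
    by_cases hp : p.1 = k
    · rw [List.find?_cons_of_pos (by simp [hp])] at hf
      have hpw : p = (k, w) := Option.some.inj hf
      subst hpw
      simp only [List.map_cons]
      rw [if_pos (by simp), map_repl_of_not_mem w hk.1]
    · rw [List.find?_cons_of_neg (by simp [hp])] at hf
      rw [List.map_cons, ih hk.2 hf]
      simp [hp]

lemma map_fst_repl (l : List (Int × List Int)) (k : Int) (v : List Int) :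
    (l.map (fun p => if p.1 == k then (k, v) else p)).map Prod.fst = l.map Prod.fst := by
  rw [List.map_map]
  apply List.map_congr_left
  intro p _
  by_cases h : p.1 = k <;> simp [h]

lemma forall2_map_repl {l m : List (Int × List Int)} {k : Int} {v w : List Int}
    (h : List.Forall₂ QRel l m) (hq : QRel (k, v) (k, w)) :
    List.Forall₂ QRel (l.map (fun p => if p.1 == k then (k, v) else p))
      (m.map (fun p => if p.1 == k then (k, w) else p)) := by
  induction h with
  | nil => exact List.Forall₂.nil
  | @cons p q l' m' hpq _ ih =>
    simp only [List.map_cons]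
    by_cases hp : p.1 = k
    · rw [if_pos (by simp [hp]), if_pos (by simp [← hpq.1, hp])]
      exact List.Forall₂.cons hq ih
    · rw [if_neg (by simp [hp]), if_neg (by simp [← hpq.1, hp])]
      exact List.Forall₂.cons hpq ih

lemma nodup_of_pairwise_lt {l : List Int} (h : l.Pairwise (· < ·)) : l.Nodup :=
  h.imp (fun hab => ne_of_lt hab)

lemma qrel_new {v w : List Int} (k prev : Int)
    (hv : v.Pairwise (· < ·)) (hw : w.Nodup) (hm : ∀ x : Int, x ∈ v ↔ x ∈ w)
    (hnp : prev ∉ v) :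
    QRel (k, PySem.List.sorted (v ++ [prev]) (fun x => x)) (k, w ++ [prev]) := by
  have hnpw : prev ∉ w := fun h => hnp ((hm prev).mpr h)
  have hnd : (v ++ [prev]).Nodup := by
    refine List.Nodup.append (nodup_of_pairwise_lt hv) (by simp) ?_
    intro x hx hx1
    exact hnp (by simpa using (List.mem_singleton.mp hx1) ▸ hx)
  have hperm : (PySem.List.sorted (v ++ [prev]) (fun x => x) false).Perm (v ++ [prev]) :=
    PySem.List.sorted_perm _ _ _
  have hndS : (PySem.List.sorted (v ++ [prev]) (fun x => x) false).Nodup :=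
    hperm.nodup_iff.mpr hnd
  have hle : (PySem.List.sorted (v ++ [prev]) (fun x => x) false).Pairwise (· ≤ ·) :=
    PySem.List.sorted_pairwise _ _
  refine ⟨rfl, ?_, ?_, ?_⟩
  · exact (hle.and hndS).imp (fun hab => lt_of_le_of_ne hab.1 hab.2)
  · refine List.Nodup.append hw (by simp) ?_
    intro x hx hx1
    exact hnpw ((List.mem_singleton.mp hx1) ▸ hx)
  · intro x
    rw [hperm.mem_iff]
    simp [hm x]

-- Generic: a relation preserved by the two loop bodies is preserved by the two folds.
lemma foldl_rel {α β γ : Type} (R : α → β → Prop) (f : α → γ → α) (g : β → γ → β)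
    (l : List γ) (a : α) (b : β) (h : R a b)
    (hstep : ∀ a b x, x ∈ l → R a b → R (f a x) (g b x)) :
    R (l.foldl f a) (l.foldl g b) := by
  induction l generalizing a b with
  | nil => exact h
  | cons x t ih =>
    exact ih (f a x) (g b x) (hstep a b x (by simp) h)
      (fun a b y hy hab => hstep a b y (by simp [hy]) hab)

-- One arc step of A versus the set-building step preserves the invariant.
lemma step_rel (a b : PySem.Dict Int (List Int)) (k prev : Int) (h : DRel a b) :
    DRel (pvStepA a (k, prev)) (pvStepB b (k, prev)) := by
  unfold pvStepA pvStepB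
  obtain ⟨hnd, hf⟩ := h
  have hany := any_key hf k
  rcases find?_key hf k with ⟨hfa, hfb⟩ | ⟨v, w, hfa, hfb, hq⟩
  · -- k is a fresh key in both dicts
    have hca : a.contains k = false := by
      simp only [PySem.Dict.contains]
      rw [List.any_eq_false]
      intro p hp
      simpa using List.find?_eq_none.mp hfa p hp
    have hcb : b.contains k = false := by
      rw [PySem.Dict.contains, ← hany, ← PySem.Dict.contains, hca]
    have hknot : k ∉ a.items.map Prod.fst := by
      intro hk
      rcases List.mem_map.mp hk with ⟨p, hp, hpk⟩
      have := List.find?_eq_none.mp hfa p hp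
      simp [hpk] at this
    have ha1 : (a.insert k []).items = a.items ++ [((k : Int), ([] : List Int))] :=
      PySem.Dict.items_insert_of_not_contains a _ hca
    have hget : (a.insert k []).getD k [] = [] := by
      simp only [PySem.Dict.getD, PySem.Dict.get?, ha1]
      rw [List.find?_append, hfa]
      simp
    have hca1 : (a.insert k []).contains k = true := by
      simp [PySem.Dict.contains, ha1]
    have hgetb : b.getD k PySem.Set.empty = PySem.Set.empty :=
      PySem.Dict.getD_of_not_contains b _ hcb
    simp only [hca, Bool.false_eq_true, if_false, hget, List.not_mem_nil, List.nil_append, hgetb]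
    have hsp : PySem.List.sorted [prev] (fun x : Int => x) = [prev] := rfl
    have hItems : ((a.insert k []).insert k (PySem.List.sorted [prev] (fun x => x))).items
        = a.items ++ [((k : Int), PySem.List.sorted [prev] (fun x => x))] := by
      rw [PySem.Dict.items_insert_of_contains _ _ hca1, ha1, List.map_append,
        map_repl_of_not_mem _ hknot]
      simp
    have hItemsB : (b.insert k (PySem.Set.add PySem.Set.empty prev)).items
        = b.items ++ [((k : Int), [prev])] := by
      rw [show PySem.Set.add PySem.Set.empty prev = [prev] from rfl,
        PySem.Dict.items_insert_of_not_contains b _ hcb]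
    constructor
    · rw [hItems]
      simp only [List.map_append, List.map_cons, List.map_nil]
      exact List.Nodup.append hnd (by simp) (by simp [hknot])
    · rw [hItems, hItemsB, hsp]
      exact List.rel_append hf (List.Forall₂.cons ⟨rfl, by simp, by simp, by simp⟩
        List.Forall₂.nil)
  · -- k already present, with aligned values v (A, sorted list) and w (a set)
    have hca : a.contains k = true := by
      simp only [PySem.Dict.contains, List.any_eq_true]
      exact ⟨(k, v), List.mem_of_find?_eq_some hfa, by simp⟩
    have hcb : b.contains k = true := by
      rw [PySem.Dict.contains, ← hany, ← PySem.Dict.contains, hca]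
    have hgeta : a.getD k [] = v := by simp [PySem.Dict.getD, PySem.Dict.get?, hfa]
    have hgetb : b.getD k PySem.Set.empty = w := by
      simp [PySem.Dict.getD, PySem.Dict.get?, hfb]
    have hmk : (b.items.map Prod.fst).Nodup := by rw [← forall2_map_fst hf]; exact hnd
    simp only [hca, if_true, hgeta, hgetb]
    by_cases hp : prev ∈ v
    · -- nothing changes on either side
      have hpw : prev ∈ w := (hq.2.2.2 prev).mp hp
      have haddw : PySem.Set.add w prev = w := by
        simp [PySem.Set.add, hpw]
      have hitems : (b.insert k w).items = b.items := by
        rw [PySem.Dict.items_insert_of_contains _ _ hcb]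
        exact map_repl_id hmk hfb
      have hbins : b.insert k w = b := by
        cases b with
        | mk items => exact congrArg PySem.Dict.mk hitems
      rw [if_pos hp, haddw, hbins]
      exact ⟨hnd, hf⟩
    · -- append prev on both sides
      have hpw : prev ∉ w := fun hw => hp ((hq.2.2.2 prev).mpr hw)
      rw [if_neg hp]
      have haddw : PySem.Set.add w prev = w ++ [prev] := by
        simp [PySem.Set.add, hpw]
      have hq2 := qrel_new k prev hq.2.1 hq.2.2.1 hq.2.2.2 hp
      constructor
      · rw [PySem.Dict.items_insert_of_contains _ _ hca, map_fst_repl]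
        exact hnd
      · rw [PySem.Dict.items_insert_of_contains _ _ hca, haddw,
          PySem.Dict.items_insert_of_contains _ _ hcb]
        exact forall2_map_repl hf hq2

-- From the invariant: A's final dict is the set dict with every set sorted.
lemma final_map {l m : List (Int × List Int)} (h : List.Forall₂ QRel l m) :
    l = m.map (fun p => (p.1, PySem.List.sorted p.2 (fun x => x))) := by
  induction h with
  | nil => rfl
  | @cons p q l' m' hq _ ih =>
    simp only [List.map_cons, ← ih]
    congr 1
    have hnv : p.2.Nodup := nodup_of_pairwise_lt hq.2.1
    have hperm : p.2.Perm q.2 :=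
      (List.perm_ext_iff_of_nodup hnv hq.2.2.1).mpr hq.2.2.2
    have := PySem.List.sorted_eq_of_perm_of_pairwise_lt q.2 p.2 (fun x => x) hperm hq.2.1
    exact Prod.ext hq.1 this.symm

lemma drel_empty : DRel PySem.Dict.empty PySem.Dict.empty :=
  ⟨by simp [PySem.Dict.empty], by simp [PySem.Dict.empty]⟩

-- ---- the set dict built by pvStepB, in closed form ----

lemma keys_foldB (L : List (Int × Int)) :
    (L.foldl pvStepB PySem.Dict.empty).keys = PySem.Set.ofList (L.map Prod.fst) := by
  unfold pvStepB
  rw [PySem.Dict.keys_foldl_insert_key L Prod.fst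
    (fun b a => PySem.Set.add (b.getD a.1 PySem.Set.empty) a.2) PySem.Dict.empty]
  rw [PySem.Dict.keys_empty, PySem.Set.update_nil_left]

lemma nodup_keys_foldB (L : List (Int × Int)) :
    (L.foldl pvStepB PySem.Dict.empty).keys.Nodup := by
  rw [keys_foldB]; exact PySem.Set.nodup_ofList _

lemma getD_foldB (L : List (Int × Int)) (d : PySem.Dict Int (List Int)) (k : Int) :
    (L.foldl pvStepB d).getD k PySem.Set.empty
      = PySem.Set.update (d.getD k PySem.Set.empty)
          ((L.filter (fun a => a.1 == k)).map Prod.snd) := by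
  induction L generalizing d with
  | nil => simp [PySem.Set.update]
  | cons a t ih =>
    simp only [List.foldl_cons]
    rw [ih]
    by_cases h : a.1 = k
    · rw [List.filter_cons_of_pos (by simp [h]), List.map_cons, PySem.Set.update_cons]
      congr 1
      simp [pvStepB, h]
    · rw [List.filter_cons_of_neg (by simp [h])]
      congr 1
      simp [pvStepB, PySem.Dict.getD_insert, Ne.symm h]

-- ---- the order produced by sorted2 on int pairs ----

def pvBefore (a b : Int × Int) : Bool :=
  decide (a.1 < b.1) || (!decide (b.1 < a.1) && decide (a.2 < b.2))

def pvLe (a b : Int × Int) : Prop := pvBefore b a = false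

lemma pvBefore_false_iff (a b : Int × Int) :
    pvBefore a b = false ↔ (b.1 < a.1 ∨ (b.1 = a.1 ∧ b.2 ≤ a.2)) := by
  simp only [pvBefore, Bool.or_eq_false_iff, Bool.and_eq_false_iff,
    decide_eq_false_iff_not, Bool.not_eq_false', decide_eq_true_eq, not_lt]
  omega

lemma pvBefore_true_asym {a b : Int × Int} (h : pvBefore a b = true) :
    pvBefore b a = false := by
  have h' : ¬ (pvBefore a b = false) := by simp [h]
  rw [pvBefore_false_iff] at h'
  rw [pvBefore_false_iff]
  omega

lemma pvLe_trans {a b c : Int × Int} (h1 : pvLe a b) (h2 : pvLe b c) : pvLe a c := by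
  unfold pvLe at h1 h2 ⊢
  rw [pvBefore_false_iff] at h1 h2 ⊢
  omega

lemma insertBy_pairwise (x : Int × Int) (l : List (Int × Int))
    (h : l.Pairwise pvLe) : (PySem.List.insertBy pvBefore x l).Pairwise pvLe := by
  induction l with
  | nil => simp [PySem.List.insertBy]
  | cons y ys ih =>
    rcases List.pairwise_cons.mp h with ⟨hy, hys⟩
    by_cases hb : pvBefore x y = true
    · rw [show PySem.List.insertBy pvBefore x (y :: ys) = x :: y :: ys from by
        simp [PySem.List.insertBy, hb]]
      refine List.pairwise_cons.mpr ⟨?_, h⟩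
      intro z hz
      have hxy : pvLe x y := pvBefore_true_asym hb
      rcases List.mem_cons.mp hz with rfl | hz'
      · exact hxy
      · exact pvLe_trans hxy (hy z hz')
    · rw [show PySem.List.insertBy pvBefore x (y :: ys)
          = y :: PySem.List.insertBy pvBefore x ys from by
        simp [PySem.List.insertBy, hb]]
      refine List.pairwise_cons.mpr ⟨?_, ih hys⟩
      intro z hz
      rcases (PySem.List.mem_insertBy pvBefore x z ys).mp hz with rfl | hz'
      · exact eq_false_of_ne_true hb
      · exact hy z hz'

lemma pairwise_foldl_insertBy (xs acc : List (Int × Int)) (h : acc.Pairwise pvLe) :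
    (xs.foldl (fun acc x => PySem.List.insertBy pvBefore x acc) acc).Pairwise pvLe := by
  induction xs generalizing acc with
  | nil => exact h
  | cons x t ih => exact ih _ (insertBy_pairwise x acc h)

lemma sorted2_eq_foldl (xs : List (Int × Int)) :
    PySem.List.sorted2 xs Prod.fst Prod.snd
      = xs.foldl (fun acc x => PySem.List.insertBy pvBefore x acc) [] := rfl

lemma sorted2_pairwise_pvLe (xs : List (Int × Int)) :
    (PySem.List.sorted2 xs Prod.fst Prod.snd).Pairwise pvLe := by
  rw [sorted2_eq_foldl]
  exact pairwise_foldl_insertBy xs [] (by simp)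

-- Per key k, the snds of the k-block of sorted(set(L)) are exactly
-- sorted(set of predecessors of k in L).
lemma block_eq_sorted (L : List (Int × Int)) (k : Int) :
    ((PySem.List.sorted2 (PySem.Set.ofList L) Prod.fst Prod.snd).filter
        (fun a => a.1 == k)).map Prod.snd
      = PySem.List.sorted
          (PySem.Set.ofList ((L.filter (fun a => a.1 == k)).map Prod.snd)) (fun x => x) := by
  have hSperm : (PySem.List.sorted2 (PySem.Set.ofList L) Prod.fst Prod.snd).Perm
      (PySem.Set.ofList L) := PySem.List.sorted2_perm _ _ _ _
  have hSnodup : (PySem.List.sorted2 (PySem.Set.ofList L) Prod.fst Prod.snd).Nodup :=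
    hSperm.nodup_iff.mpr (PySem.Set.nodup_ofList L)
  have hFnodup : ((PySem.List.sorted2 (PySem.Set.ofList L) Prod.fst Prod.snd).filter
      (fun a => a.1 == k)).Nodup := hSnodup.sublist List.filter_sublist
  -- strict increase of the snds inside the k-block
  have hpair : (((PySem.List.sorted2 (PySem.Set.ofList L) Prod.fst Prod.snd).filter
      (fun a => a.1 == k)).map Prod.snd).Pairwise (· < ·) := by
    rw [List.pairwise_map]
    have h1 : ((PySem.List.sorted2 (PySem.Set.ofList L) Prod.fst Prod.snd).filter
        (fun a => a.1 == k)).Pairwise (fun a b => pvLe a b ∧ a ≠ b) :=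
      List.Pairwise.sublist List.filter_sublist
        ((sorted2_pairwise_pvLe (PySem.Set.ofList L)).and hSnodup)
    refine List.Pairwise.imp_of_mem ?_ h1
    intro a b ha hb hab
    have hak : a.1 = k := by simpa using (List.mem_filter.mp ha).2
    have hbk : b.1 = k := by simpa using (List.mem_filter.mp hb).2
    have hle := hab.1
    rw [pvLe, pvBefore_false_iff] at hle
    have hne2 : a.2 ≠ b.2 := by
      intro he
      exact hab.2 (Prod.ext (hak.trans hbk.symm) he)
    omega
  -- same elements as set(predecessors of k in L)
  have hnodupX : (((PySem.List.sorted2 (PySem.Set.ofList L) Prod.fst Prod.snd).filter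
      (fun a => a.1 == k)).map Prod.snd).Nodup := by
    refine List.Nodup.map_on ?_ hFnodup
    intro x hx y hy hxy
    have hxk : x.1 = k := by simpa using (List.mem_filter.mp hx).2
    have hyk : y.1 = k := by simpa using (List.mem_filter.mp hy).2
    exact Prod.ext (hxk.trans hyk.symm) hxy
  have hmem : ∀ q : Int,
      q ∈ ((PySem.List.sorted2 (PySem.Set.ofList L) Prod.fst Prod.snd).filter
        (fun a => a.1 == k)).map Prod.snd
      ↔ q ∈ PySem.Set.ofList ((L.filter (fun a => a.1 == k)).map Prod.snd) := by
    intro q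
    rw [PySem.Set.mem_ofList]
    simp only [List.mem_map, List.mem_filter, hSperm.mem_iff, PySem.Set.mem_ofList]
  have hperm : (((PySem.List.sorted2 (PySem.Set.ofList L) Prod.fst Prod.snd).filter
      (fun a => a.1 == k)).map Prod.snd).Perm
      (PySem.Set.ofList ((L.filter (fun a => a.1 == k)).map Prod.snd)) :=
    (List.perm_ext_iff_of_nodup hnodupX (PySem.Set.nodup_ofList _)).mpr hmem
  exact (PySem.List.sorted_eq_of_perm_of_pairwise_lt _ _ _ hperm hpair).symm

-- ===== VERDICT (by name: the statement is the Claim_ definition above) =====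
theorem to_edge_dict_spec : Claim_equal_to_edge_dict := by
  intro edge_list _
  unfold Spec_to_edge_dict
  rw [A_eq_fold_arcs]
  set L := pvArcs edge_list with hL
  have hrel : DRel (L.foldl pvStepA PySem.Dict.empty) (L.foldl pvStepB PySem.Dict.empty) :=
    foldl_rel DRel pvStepA pvStepB L _ _ drel_empty
      (fun a b x _ h => step_rel a b x.1 x.2 h)
  have hA : (L.foldl pvStepA PySem.Dict.empty).items
      = (L.foldl pvStepB PySem.Dict.empty).items.map
          (fun p => (p.1, PySem.List.sorted p.2 (fun x => x))) := final_map hrel.2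
  have hitemsB : (L.foldl pvStepB PySem.Dict.empty).items
      = (PySem.Set.ofList (L.map Prod.fst)).map
          (fun k => (k, PySem.Set.ofList ((L.filter (fun a => a.1 == k)).map Prod.snd))) := by
    rw [PySem.Dict.items_eq_map_keys _ (nodup_keys_foldB L) PySem.Set.empty, keys_foldB]
    apply List.map_congr_left
    intro k _
    rw [getD_foldB, PySem.Dict.getD_empty,
      show (PySem.Set.empty : PySem.Set Int) = [] from rfl, PySem.Set.update_nil_left]
  rw [hA, hitemsB, List.map_map]
  have halt : to_edge_dict_alt edge_list
      = (PySem.List.dedup (L.map Prod.fst)).map (fun d => (d,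
          ((PySem.List.sorted2 (PySem.Set.ofList L) Prod.fst Prod.snd).foldl
            (fun g a => g.modify a.1 [] (fun l => l ++ [a.2])) PySem.Dict.empty).getD d [])) :=
    rfl
  rw [halt, PySem.List.dedup_eq_ofList]
  apply List.map_congr_left
  intro k _
  simp only [Function.comp]
  rw [PySem.Dict.getD_foldl_modify_append, PySem.Dict.getD_empty, List.nil_append,
    block_eq_sorted]
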